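-- pv_equiv track=rewrite | github.com/vpc20/python-algorithms | CountingOccurences.py | binary_search_boundary
-- ===== SOURCE A (Python) =====
-- def binary_search_boundary(needle, haystack, right_bound=True):
--     """
--     Search for the left or right boundary of needle in haystack
--
--     :param needle: search argument
--     :param haystack: array to perform search on
--     :param right_bound: True  will return the right boundary,
--                         False will return left boundary
--     :return: index of left or right boundary
--     """
--     left = 0
--     right = int(len(haystack) - 1)
--     mid = int((left + right) / 2)
--
--     while left <= right:
--         if right_bound:
--             if needle < haystack[mid]:
--                 right = mid - 1
--             else:
--                 left = mid + 1
--         else: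
--             if needle <= haystack[mid]:
--                 right = mid - 1
--             else:
--                 left = mid + 1
--         mid = int((left + right) / 2)
--     return left
-- ===== SOURCE B (Python) =====
-- def binary_search_boundary(needle, haystack, right_bound=True):
--     """Recursive divide-and-conquer boundary search (same result as the
--     iterative version: returns the insertion index of the right/left
--     boundary of needle in the sorted haystack)."""
--     def rec(left, right):
--         if left > right:
--             return left
--         mid = (left + right) // 2
--         if (needle < haystack[mid]) if right_bound else (needle <= haystack[mid]):
--             return rec(left, mid - 1)
--         return rec(mid + 1, right)
--     return rec(0, len(haystack) - 1)
-- ===== Notes on version B (the rewrite author's own statement) =====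
-- stated objective: alternative
-- what changed: Replaces the iterative while-loop with explicit left/right/mid state and truncating int((l+r)/2) by a textbook recursive divide-and-conquer helper rec(left, right) using floor division, returning left at the base case.
import Mathlib
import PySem

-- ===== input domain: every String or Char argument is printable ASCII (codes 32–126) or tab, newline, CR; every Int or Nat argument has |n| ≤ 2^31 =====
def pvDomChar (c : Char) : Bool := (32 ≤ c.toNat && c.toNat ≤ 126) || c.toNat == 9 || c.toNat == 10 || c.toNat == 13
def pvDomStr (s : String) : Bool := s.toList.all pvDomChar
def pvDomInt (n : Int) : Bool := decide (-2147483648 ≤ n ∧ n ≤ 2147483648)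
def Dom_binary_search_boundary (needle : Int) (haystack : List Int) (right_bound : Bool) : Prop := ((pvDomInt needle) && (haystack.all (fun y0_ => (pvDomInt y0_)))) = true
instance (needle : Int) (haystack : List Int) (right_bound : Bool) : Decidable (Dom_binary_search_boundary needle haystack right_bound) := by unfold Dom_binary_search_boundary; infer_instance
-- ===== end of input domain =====

-- B replaces A's iterative while-loop (left/right/mid state, truncating int((l+r)/2)) by a textbook recursive divide-and-conquer helper with floor division; same O(log n) cost, alternative decomposition.


-- ===== PORT A =====
-- A's while-loop, transliterated with a fuel counter (the loop runs at most
-- haystack.length + 1 times, so the fuel is never exhausted on the real start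
-- state); state is (left, right, mid) exactly as in the Python, mid recomputed
-- at the end of each iteration with Python's int((l+r)/2) = truncating division.
-- haystack[mid] is always in range on executed iterations, ported as pyGetD.
def bsbLoopA (needle : Int) (haystack : List Int) (right_bound : Bool) : Nat → Int → Int → Int → Int
  | 0, left, _, _ => left
  | fuel + 1, left, right, mid =>
    if left ≤ right then
      if right_bound then
        if needle < PySem.List.pyGetD haystack mid 0 then
          bsbLoopA needle haystack right_bound fuel left (mid - 1) (Int.tdiv (left + (mid - 1)) 2)
        else
          bsbLoopA needle haystack right_bound fuel (mid + 1) right (Int.tdiv ((mid + 1) + right) 2)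
      else
        if needle ≤ PySem.List.pyGetD haystack mid 0 then
          bsbLoopA needle haystack right_bound fuel left (mid - 1) (Int.tdiv (left + (mid - 1)) 2)
        else
          bsbLoopA needle haystack right_bound fuel (mid + 1) right (Int.tdiv ((mid + 1) + right) 2)
    else left

def binary_search_boundary (needle : Int) (haystack : List Int) (right_bound : Bool) : Int :=
  bsbLoopA needle haystack right_bound (haystack.length + 1) 0 ((haystack.length : Int) - 1)
    (Int.tdiv (0 + ((haystack.length : Int) - 1)) 2)

-- ===== PORT B =====
-- B's recursive helper rec(left, right); Python's // is floor division (fdiv).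
def bsbRec (needle : Int) (haystack : List Int) (right_bound : Bool) (left right : Int) : Int :=
  if h : left > right then left
  else
    let mid := Int.fdiv (left + right) 2
    if (if right_bound then needle < PySem.List.pyGetD haystack mid 0
        else needle ≤ PySem.List.pyGetD haystack mid 0) then
      bsbRec needle haystack right_bound left (mid - 1)
    else
      bsbRec needle haystack right_bound (mid + 1) right
termination_by (right + 1 - left).toNat
decreasing_by
  · have : Int.fdiv (left + right) 2 = (left + right) / 2 := Int.fdiv_eq_ediv_of_nonneg _ (by omega)
    omega
  · have : Int.fdiv (left + right) 2 = (left + right) / 2 := Int.fdiv_eq_ediv_of_nonneg _ (by omega)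
    omega

def binary_search_boundary_alt (needle : Int) (haystack : List Int) (right_bound : Bool) : Int :=
  bsbRec needle haystack right_bound 0 ((haystack.length : Int) - 1)

-- ===== PRECONDITION & SPEC =====
def Spec_binary_search_boundary (needle : Int) (haystack : List Int) (right_bound : Bool) (out : Int) : Prop := out = binary_search_boundary_alt needle haystack right_bound
instance (needle : Int) (haystack : List Int) (right_bound : Bool) (out : Int) : Decidable (Spec_binary_search_boundary needle haystack right_bound out) := by unfold Spec_binary_search_boundary; infer_instance

-- ===== CLAIM (what is proved, stated in full; the proofs are below) =====
def Claim_equal_binary_search_boundary : Prop := ∀ (needle : Int) (haystack : List Int) (right_bound : Bool), Dom_binary_search_boundary needle haystack right_bound → Spec_binary_search_boundary needle haystack right_bound (binary_search_boundary needle haystack right_bound)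

-- ===== LEMMAS AND PROOFS =====



lemma bsbLoop_eq_rec (needle : Int) (haystack : List Int) (right_bound : Bool) :
    ∀ (fuel : Nat) (l r : Int), 0 ≤ l → (r + 1 - l).toNat < fuel →
      bsbLoopA needle haystack right_bound fuel l r (Int.tdiv (l + r) 2) =
        bsbRec needle haystack right_bound l r := by
  intro fuel
  induction fuel with
  | zero => intro l r _ h; omega
  | succ fuel ih =>
    intro l r hl hf
    rw [bsbRec]
    by_cases hlr : l ≤ r
    · have hmid : Int.tdiv (l + r) 2 = Int.fdiv (l + r) 2 := by
        rw [Int.tdiv_eq_ediv_of_nonneg (by omega : (0:Int) ≤ l + r),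
          Int.fdiv_eq_ediv_of_nonneg (l + r) (by norm_num)]
      have hed : Int.fdiv (l + r) 2 = (l + r) / 2 := Int.fdiv_eq_ediv_of_nonneg (l + r) (by norm_num)
      simp only [bsbLoopA, if_pos hlr, dif_neg (by omega : ¬ l > r), hmid]
      set mid := Int.fdiv (l + r) 2 with hm
      have hb1 : l ≤ mid := by omega
      have hb2 : mid ≤ r := by omega
      cases right_bound with
      | true =>
        simp only [if_true]
        by_cases hc : needle < PySem.List.pyGetD haystack mid 0
        · simp only [if_pos hc]
          exact ih l (mid - 1) hl (by omega)
        · simp only [if_neg hc]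
          exact ih (mid + 1) r (by omega) (by omega)
      | false =>
        simp only [Bool.false_eq_true, if_false]
        by_cases hc : needle ≤ PySem.List.pyGetD haystack mid 0
        · simp only [if_pos hc]
          exact ih l (mid - 1) hl (by omega)
        · simp only [if_neg hc]
          exact ih (mid + 1) r (by omega) (by omega)
    · simp [bsbLoopA, hlr, show l > r by omega]

-- ===== VERDICT (by name: the statement is the Claim_ definition above) =====
theorem binary_search_boundary_spec : Claim_equal_binary_search_boundary := by
  intro needle haystack right_bound _
  unfold Spec_binary_search_boundary binary_search_boundary binary_search_boundary_alt
  rw [show (0 : Int) + ((haystack.length : Int) - 1) = 0 + ((haystack.length : Int) - 1) from rfl]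
  exact bsbLoop_eq_rec needle haystack right_bound (haystack.length + 1) 0
    ((haystack.length : Int) - 1) le_rfl (by omega)
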